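-- pv_equiv track=rewrite | github.com/DaNiCHKaTZ/labs | tech/l5/lab5(17).py | update
-- ===== SOURCE A (Python) =====
-- def update(arr, L):
--     result = []
--     i = 0
--     while i < len(arr):
--         count = 1
--         while i + count < len(arr) and arr[i] == arr[i + count]:
--             count += 1
--         if count > L:
--             result.append(0)
--         else:
--             result.extend(arr[i:i + count])
--         i += count
--     return result
-- ===== SOURCE B (Python) =====
-- def update(arr, L):
--     # One pass building consecutive-run groups by comparing with the previous
--     # element, then one pass over the groups producing the result.
--     groups = []
--     for x in arr:
--         if groups and groups[-1][0] == x: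
--             groups[-1].append(x)
--         else:
--             groups.append([x])
--     result = []
--     for g in groups:
--         if len(g) > L:
--             result.append(0)
--         else:
--             result.extend(g)
--     return result
-- ===== Notes on version B (the rewrite author's own statement) =====
-- stated objective: idiomatic
-- what changed: Replaces the index-based two-pointer scan with an inner run-counting while-loop by a single previous-element pass that builds the run groups, followed by a simple pass over the groups.
import Mathlib
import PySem

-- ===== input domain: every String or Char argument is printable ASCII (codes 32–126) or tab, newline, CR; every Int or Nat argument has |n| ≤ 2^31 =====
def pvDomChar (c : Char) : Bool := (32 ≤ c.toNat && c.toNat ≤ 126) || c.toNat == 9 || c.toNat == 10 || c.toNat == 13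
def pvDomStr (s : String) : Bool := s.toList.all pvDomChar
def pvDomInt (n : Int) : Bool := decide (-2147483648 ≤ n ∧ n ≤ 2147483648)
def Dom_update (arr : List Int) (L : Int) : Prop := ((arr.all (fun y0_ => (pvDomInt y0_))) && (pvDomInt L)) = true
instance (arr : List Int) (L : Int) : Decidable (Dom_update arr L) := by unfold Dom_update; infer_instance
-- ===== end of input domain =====

-- B replaces A's index-based two-pointer scan (inner run-counting while) by a
-- previous-element pass that builds the run groups, then a pass over the groups.

-- ===== PORT A =====
-- inner while: 'while i + count < len(arr) and arr[i] == arr[i + count]: count += 1'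
-- (indices are guarded in range by the loop condition, so getD is exact there)
def updCount (arr : List Int) (i : Nat) (count : Nat) : Nat :=
  if i + count < arr.length ∧ arr.getD i 0 = arr.getD (i + count) 0 then
    updCount arr i (count + 1)
  else count
termination_by arr.length - (i + count)

theorem updCount_ge (arr : List Int) (i : Nat) (count : Nat) : count ≤ updCount arr i count := by
  unfold updCount
  split
  · exact le_trans (Nat.le_succ _) (updCount_ge arr i (count + 1))
  · exact le_refl _
termination_by arr.length - (i + count)

-- outer while: 'while i < len(arr): …'
def updLoop (arr : List Int) (L : Int) (i : Nat) (result : List Int) : List Int :=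
  if h : i < arr.length then
    let count := updCount arr i 1
    let result' := if (count : Int) > L then result ++ [0]
                   else result ++ PySem.List.slice arr (some (i : Int)) (some ((i : Int) + (count : Int)))
    updLoop arr L (i + count) result'
  else result
termination_by arr.length - i
decreasing_by
  have h1 : 1 ≤ updCount arr i 1 := updCount_ge arr i 1
  omega

def update (arr : List Int) (L : Int) : List Int :=
  updLoop arr L 0 []

-- ===== PORT B =====
-- 'if groups and groups[-1][0] == x: groups[-1].append(x) else: groups.append([x])'
-- (every group present is nonempty, so headD reads exactly groups[-1][0])
def stepGroup (gs : List (List Int)) (x : Int) : List (List Int) :=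
  match gs.getLast? with
  | some g => if g.headD 0 = x then gs.dropLast ++ [g ++ [x]] else gs ++ [[x]]
  | none => gs ++ [[x]]

-- second loop: 'for g in groups: …'
def emitGroup (L : Int) (result : List Int) (g : List Int) : List Int :=
  if (g.length : Int) > L then result ++ [0] else result ++ g

def update_alt (arr : List Int) (L : Int) : List Int :=
  (arr.foldl stepGroup []).foldl (emitGroup L) []

-- ===== PRECONDITION & SPEC =====
def Spec_update (arr : List Int) (L : Int) (out : List Int) : Prop := out = update_alt arr L
instance (arr : List Int) (L : Int) (out : List Int) : Decidable (Spec_update arr L out) := by unfold Spec_update; infer_instance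

-- ===== CLAIM (what is proved, stated in full; the proofs are below) =====
def Claim_equal_update : Prop := ∀ (arr : List Int) (L : Int), Dom_update arr L → Spec_update arr L (update arr L)

-- ===== LEMMAS AND PROOFS =====

-- common spine: the run (span) decomposition of a list
def spanGroups (xs : List Int) : List (List Int) :=
  match xs with
  | [] => []
  | x :: ys =>
    (x :: ys.takeWhile (fun y => y = x)) :: spanGroups (ys.dropWhile (fun y => y = x))
termination_by xs.length
decreasing_by
  simp only [List.length_cons]
  exact Nat.lt_succ_of_le (ys.dropWhile_sublist _).length_le

-- unfolding lemma for the well-founded spanGroups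
theorem spanGroups_cons (x : Int) (ys : List Int) :
    spanGroups (x :: ys) =
      (x :: ys.takeWhile (fun y => y = x)) :: spanGroups (ys.dropWhile (fun y => y = x)) := by
  rw [spanGroups.eq_def]

-- B's grouping fold computes spanGroups
theorem fold_stepGroup (gs : List (List Int)) (g : List Int) (v : Int) (xs : List Int)
    (hg : g.headD 0 = v) :
    xs.foldl stepGroup (gs ++ [g]) =
      gs ++ [g ++ xs.takeWhile (fun y => y = v)] ++ spanGroups (xs.dropWhile (fun y => y = v)) := by
  induction xs generalizing gs g v with
  | nil => simp [spanGroups]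
  | cons y ys ih =>
    have hg' : g.head?.getD 0 = v := by simpa [List.headD_eq_head?_getD] using hg
    simp only [List.foldl_cons]
    by_cases hy : y = v
    · have hstep : stepGroup (gs ++ [g]) y = gs ++ [g ++ [y]] := by
        simp [stepGroup, hg', hy]
      rw [hstep]
      have hg2 : (g ++ [y]).headD 0 = v := by
        cases g with
        | nil => simpa using hy
        | cons a as => simpa using hg
      rw [ih gs (g ++ [y]) v hg2]
      simp [List.dropWhile_cons, hy]
    · have hstep : stepGroup (gs ++ [g]) y = (gs ++ [g]) ++ [[y]] := by
        simp only [stepGroup, List.getLast?_concat, List.dropLast_concat]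
        rw [if_neg (fun he => hy (hg.symm.trans he).symm)]
      rw [hstep]
      rw [ih (gs ++ [g]) [y] y rfl]
      have h1 : (y :: ys).takeWhile (fun z => z = v) = [] := by
        simp [hy]
      have h2 : (y :: ys).dropWhile (fun z => z = v) = y :: ys := by
        simp [hy]
      rw [h1, h2, spanGroups_cons]
      simp

theorem foldl_stepGroup_eq_spanGroups (xs : List Int) :
    xs.foldl stepGroup [] = spanGroups xs := by
  cases xs with
  | nil => simp [spanGroups]
  | cons x ys =>
    have hstep : stepGroup [] x = [] ++ [[x]] := rfl
    simp only [List.foldl_cons, hstep]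
    rw [fold_stepGroup [] [x] x ys rfl]
    rw [spanGroups_cons]
    simp

-- folding emitGroup from an accumulator is appending a flatMap
theorem foldl_emitGroup (L : Int) (gs : List (List Int)) (res : List Int) :
    gs.foldl (emitGroup L) res =
      res ++ gs.flatMap (fun g => if (g.length : Int) > L then [0] else g) := by
  induction gs generalizing res with
  | nil => simp
  | cons g gs ih =>
    simp only [List.foldl_cons, List.flatMap_cons, emitGroup]
    rw [ih]
    split <;> simp

-- the drop at i, written as head :: tail
theorem drop_cons_of_lt (arr : List Int) (i : Nat) (hi : i < arr.length) :
    arr.drop i = arr.getD i 0 :: arr.drop (i + 1) := by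
  rw [List.getD_eq_getElem _ _ hi]
  exact (List.drop_eq_getElem_cons hi).trans rfl

-- A's inner while computes count + length of the remaining run
theorem updCount_eq (arr : List Int) (i count : Nat) :
    updCount arr i count =
      count + ((arr.drop (i + count)).takeWhile (fun y => y = arr.getD i 0)).length := by
  unfold updCount
  by_cases h : i + count < arr.length ∧ arr.getD i 0 = arr.getD (i + count) 0
  · rw [if_pos h]
    rw [updCount_eq arr i (count + 1)]
    have hd : arr.drop (i + count) = arr.getD (i + count) 0 :: arr.drop (i + count + 1) :=
      drop_cons_of_lt arr (i + count) h.1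
    rw [hd, List.takeWhile_cons]
    simp only [decide_eq_true_eq]
    rw [if_pos h.2.symm]
    have : i + (count + 1) = i + count + 1 := by omega
    rw [this]
    simp only [List.length_cons]
    omega
  · rw [if_neg h]
    rcases Nat.lt_or_ge (i + count) arr.length with hlt | hge
    · have hne : arr.getD i 0 ≠ arr.getD (i + count) 0 := by tauto
      have hd : arr.drop (i + count) = arr.getD (i + count) 0 :: arr.drop (i + count + 1) :=
        drop_cons_of_lt arr (i + count) hlt
      rw [hd, List.takeWhile_cons]
      simp only [decide_eq_true_eq]
      rw [if_neg (fun he => hne he.symm)]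
      simp
    · rw [List.drop_eq_nil_of_le hge]
      simp
termination_by arr.length - (i + count)

-- dropping the takeWhile prefix leaves the dropWhile suffix
theorem drop_length_takeWhile (l : List Int) (p : Int → Bool) :
    l.drop (l.takeWhile p).length = l.dropWhile p := by
  have h := List.drop_left' (l₁ := l.takeWhile p) (l₂ := l.dropWhile p)
    (i := (l.takeWhile p).length) rfl
  rwa [List.takeWhile_append_dropWhile] at h

-- A's outer loop appends the flatMap over the runs of the unprocessed suffix
theorem updLoop_eq (arr : List Int) (L : Int) (i : Nat) (res : List Int) :
    updLoop arr L i res =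
      res ++ (spanGroups (arr.drop i)).flatMap
        (fun g => if (g.length : Int) > L then [0] else g) := by
  unfold updLoop
  by_cases h : i < arr.length
  · rw [dif_pos h]
    have hcount : updCount arr i 1 =
        1 + ((arr.drop (i + 1)).takeWhile (fun y => y = arr.getD i 0)).length :=
      updCount_eq arr i 1
    have hdrop : arr.drop i = arr.getD i 0 :: arr.drop (i + 1) := drop_cons_of_lt arr i h
    have hspan : spanGroups (arr.drop i) =
        (arr.getD i 0 :: (arr.drop (i + 1)).takeWhile (fun y => y = arr.getD i 0)) ::
          spanGroups ((arr.drop (i + 1)).dropWhile (fun y => y = arr.getD i 0)) := by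
      rw [hdrop, spanGroups_cons]
    have hslice : PySem.List.slice arr (some (i : Int))
        (some ((i : Int) + (updCount arr i 1 : Int))) =
        arr.getD i 0 :: (arr.drop (i + 1)).takeWhile (fun y => y = arr.getD i 0) := by
      rw [PySem.List.slice_natCast_add, hcount, hdrop, Nat.add_comm 1, List.take_succ_cons]
      congr 1
      exact (List.prefix_iff_eq_take.mp (List.takeWhile_prefix _)).symm
    have hnext : arr.drop (i + updCount arr i 1) =
        (arr.drop (i + 1)).dropWhile (fun y => y = arr.getD i 0) := by
      have h1 : arr.drop (i + updCount arr i 1) =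
          (arr.drop (i + 1)).drop
            ((arr.drop (i + 1)).takeWhile (fun y => y = arr.getD i 0)).length := by
        rw [List.drop_drop, hcount]
        congr 1
        omega
      rw [h1, drop_length_takeWhile]
    rw [updLoop_eq arr L (i + updCount arr i 1), hnext, hspan]
    simp only [List.flatMap_cons]
    have hlen : ((arr.getD i 0 ::
        (arr.drop (i + 1)).takeWhile (fun y => y = arr.getD i 0)).length : Int) =
        (updCount arr i 1 : Int) := by
      rw [hcount]
      simp only [List.length_cons]
      push_cast
      omega
    by_cases hL : (updCount arr i 1 : Int) > L
    · rw [if_pos hL, if_pos (hlen ▸ hL)]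
      simp
    · rw [if_neg hL, if_neg (fun hc => hL (hlen ▸ hc)), hslice]
      simp
  · rw [dif_neg h]
    rw [List.drop_eq_nil_of_le (Nat.le_of_not_lt h)]
    simp [spanGroups]
termination_by arr.length - i
decreasing_by
  have h1 : 1 ≤ updCount arr i 1 := updCount_ge arr i 1
  omega

-- ===== VERDICT (by name: the statement is the Claim_ definition above) =====
theorem update_spec : Claim_equal_update := by
  intro arr L _
  show update arr L = update_alt arr L
  rw [update, update_alt, updLoop_eq, foldl_stepGroup_eq_spanGroups, foldl_emitGroup]
  simp
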